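-- pv_equiv track=rewrite | github.com/cristina041006/Boletines_Programacion | Python/Modular1/ejercicio/ejercicio.py | desplazar
-- ===== SOURCE A (Python) =====
-- def desplazar(lista):
--     escribir=0
--     guardar=0
--     guardar2=lista[0]
--     for i in range(len(lista)):
--         escribir=guardar2
--         guardar=lista[((i+1)%len(lista))]
--         lista[((i+1)%len(lista))]=escribir
--         guardar2=guardar
--     return lista
-- ===== SOURCE B (Python) =====
-- def desplazar(lista):
--     lista[:] = [lista[-1]] + lista[:-1]
--     return lista
-- ===== Notes on version B (the rewrite author's own statement) =====
-- stated objective: idiomatic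
-- what changed: Replaces the element-by-element carry loop (with modular index arithmetic per step) by a single in-place slice assignment building last-element + all-but-last, preserving mutation of the same list object.
import Mathlib
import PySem

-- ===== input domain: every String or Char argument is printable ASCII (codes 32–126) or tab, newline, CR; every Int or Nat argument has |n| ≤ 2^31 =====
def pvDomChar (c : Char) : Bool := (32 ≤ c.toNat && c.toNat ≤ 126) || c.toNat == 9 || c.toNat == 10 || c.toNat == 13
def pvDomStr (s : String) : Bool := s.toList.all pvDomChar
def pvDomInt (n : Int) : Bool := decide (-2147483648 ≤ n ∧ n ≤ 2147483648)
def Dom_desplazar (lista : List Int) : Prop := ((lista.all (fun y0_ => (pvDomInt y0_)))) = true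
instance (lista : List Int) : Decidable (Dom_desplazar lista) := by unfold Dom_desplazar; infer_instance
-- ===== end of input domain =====

-- B rotates right by one with a single slice assignment instead of A's carry loop; both mutate the
-- list in place (equivalence here is about the RETURN value only) and both raise IndexError on [].

-- ===== PORT A =====
-- loop body of A: j = (i+1) % len; escribir = guardar2; guardar = lista[j]; lista[j] = escribir;
-- guardar2 = guardar.  j is always a valid non-negative index (0 ≤ j < n), so List.getD/List.set
-- are exact renderings of Python's lista[j] read/write here.
def pvStepA (n : Nat) (s : List Int × Int) (i : Nat) : List Int × Int :=
  let j := (i + 1) % n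
  let escribir := s.2
  let guardar := s.1.getD j 0
  (s.1.set j escribir, guardar)

def desplazar (lista : List Int) : List Int :=
  let n := lista.length
  -- guardar2 = lista[0]: raises IndexError on [], which Pre_desplazar excludes; headD is exact otherwise
  ((List.range n).foldl (pvStepA n) (lista, lista.headD 0)).1

-- ===== PORT B =====
-- lista[:] = [lista[-1]] + lista[:-1]; return lista
def desplazar_alt (lista : List Int) : List Int :=
  match PySem.List.pyGet? lista (-1) with
  | none => []  -- IndexError on the empty list, excluded by Pre_desplazar
  | some x => x :: PySem.List.slice lista none (some (-1))

-- ===== PRECONDITION & SPEC =====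
-- Pre_ excludes exactly the empty list, on which both A and B raise IndexError.
def Pre_desplazar (lista : List Int) : Prop := lista ≠ []
instance (lista : List Int) : Decidable (Pre_desplazar lista) := by unfold Pre_desplazar; infer_instance
def pvWitness_desplazar : List Int := [1, 2, 3]

def Spec_desplazar (lista : List Int) (out : List Int) : Prop := out = desplazar_alt lista
instance (lista : List Int) (out : List Int) : Decidable (Spec_desplazar lista out) := by unfold Spec_desplazar; infer_instance

-- ===== CLAIM (what is proved, stated in full; the proofs are below) =====
def Claim_equal_desplazar : Prop := ∀ (lista : List Int), Dom_desplazar lista → Pre_desplazar lista → Spec_desplazar lista (desplazar lista)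

-- ===== LEMMAS AND PROOFS =====

-- Loop invariant: after k iterations (k < n) the list is l[0] :: (l.take k ++ l.drop (k+1))
-- (positions 1..k hold l[0..k-1], the rest is untouched) and guardar2 = l[k].
lemma loopA_inv (l : List Int) (hl : l ≠ []) (k : Nat) (hk : k < l.length) :
    (List.range k).foldl (pvStepA l.length) (l, l.headD 0)
      = (l.headD 0 :: (l.take k ++ l.drop (k + 1)), l.getD k 0) := by
  induction k with
  | zero =>
      cases l with
      | nil => simp at hl
      | cons a t => simp [List.range_zero]
  | succ k ih =>
      have hk' : k < l.length := Nat.lt_of_succ_lt hk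
      rw [List.range_succ, List.foldl_append, ih hk']
      simp only [List.foldl, pvStepA]
      have hj : (k + 1) % l.length = k + 1 := Nat.mod_eq_of_lt hk
      rw [hj]
      have hlen : (l.take k).length = k := List.length_take_of_le (Nat.le_of_lt hk')
      have hdrop : l.drop (k + 1) = l[k + 1]'hk :: l.drop (k + 2) :=
        List.drop_eq_getElem_cons hk
      refine Prod.ext ?_ ?_
      · -- list component
        show (l.headD 0 :: (l.take k ++ l.drop (k + 1))).set (k + 1) (l.getD k 0)
              = l.headD 0 :: (l.take (k + 1) ++ l.drop (k + 2))
        rw [List.set_cons_succ, hdrop]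
        rw [show l.take k ++ l[k + 1]'hk :: l.drop (k + 2)
              = (l.take k ++ [l[k + 1]'hk]) ++ l.drop (k + 2) by simp]
        rw [List.set_append_left _ _ (by simp [hlen])]
        have : (l.take k ++ [l[k + 1]'hk]).set k (l.getD k 0)
                = l.take k ++ [l.getD k 0] := by
          rw [List.set_append_right _ _ (by omega)]
          simp [hlen]
        rw [this]
        have htake : l.take (k + 1) = l.take k ++ [l.getD k 0] := by
          rw [List.take_add_one]
          simp [List.getD_eq_getElem?_getD, List.getElem?_eq_getElem hk']
        rw [htake]
      · -- guardar2 component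
        show (l.headD 0 :: (l.take k ++ l.drop (k + 1))).getD (k + 1) 0 = l.getD (k + 1) 0
        have : (l.take k ++ l.drop (k + 1)).getD k 0 = (l.drop (k + 1)).getD 0 0 := by
          rw [List.getD_eq_getElem?_getD, List.getElem?_append_right (by omega),
              hlen]
          simp [List.getD_eq_getElem?_getD]
        simp only [List.getD_cons_succ]
        rw [this, hdrop]
        simp [List.getD_eq_getElem?_getD, List.getElem?_eq_getElem hk]

-- ===== VERDICT (by name: the statement is the Claim_ definition above) =====
theorem desplazar_spec : Claim_equal_desplazar := by
  intro l _ hl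
  unfold Spec_desplazar desplazar desplazar_alt
  have hn : 0 < l.length := List.length_pos_iff.mpr hl
  show ((List.range l.length).foldl (pvStepA l.length) (l, l.headD 0)).1
      = match PySem.List.pyGet? l (-1) with
        | none => []
        | some x => x :: PySem.List.slice l none (some (-1))
  have hrange : List.range l.length = List.range (l.length - 1) ++ [l.length - 1] := by
    conv_lhs => rw [show l.length = (l.length - 1) + 1 by omega]
    exact List.range_succ
  rw [hrange, List.foldl_append, loopA_inv l hl _ (by omega)]
  simp only [List.foldl, pvStepA]
  have hj : (l.length - 1 + 1) % l.length = 0 := by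
    rw [show l.length - 1 + 1 = l.length by omega]
    exact Nat.mod_self _
  rw [hj]
  rw [PySem.List.pyGet?_neg_one, List.getLast?_eq_some_getLast hl, PySem.List.slice_to_neg_one]
  simp only [List.set_cons_zero]
  congr 1
  · rw [List.getD_eq_getElem?_getD, List.getElem?_eq_getElem (by omega : l.length - 1 < l.length)]
    simp [List.getLast_eq_getElem]
  · rw [show l.length - 1 + 1 = l.length by omega]
    simp [List.dropLast_eq_take]
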